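-- pv_equiv track=rewrite | github.com/manichandana8/DineSmartAI | app/agents/ranking.py | _dietary_satisfied
-- ===== SOURCE A (Python) =====
-- def _dietary_satisfied(rule: str, hay: str) -> bool:
--     """Whether restaurant/menu text plausibly supports this dietary restriction."""
--     rl = rule.lower().strip()
--     if rl in ("vegetarian", "veggie"):
--         return any(x in hay for x in ("vegan", "vegetarian", "veg "))
--     if rl == "vegan":
--         return "vegan" in hay
--     if rl == "halal":
--         return "halal" in hay
--     if rl in ("kosher", "kosher-style", "kosher style"):
--         return any(x in hay for x in ("kosher", "glatt", "cholov", "pareve", "parve"))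
--     if rl in ("gluten-free", "gluten free", "glutenfree", "celiac", "coeliac"):
--         return any(
--             x in hay
--             for x in (
--                 "gluten-free",
--                 "gluten free",
--                 "gluten friendly",
--                 "glutenfriendly",
--                 "gf ",
--                 " celiac",
--                 "coeliac",
--                 "sans gluten",
--             )
--         )
--     if rl in ("dairy-free", "dairy free", "lactose-free", "lactose free"):
--         return any(x in hay for x in ("dairy-free", "dairy free", "lactose-free", "lactose free", "non-dairy"))
--     if rl in ("nut-free", "nut free", "peanut-free", "tree nut"):
--         return any(x in hay for x in ("nut-free", "nut free", "peanut-free", "tree-nut"))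
--     if rl in ("egg-free", "egg free", "no egg", "without egg"):
--         return any(x in hay for x in ("egg-free", "egg free", "no egg", "eggless"))
--     if rl in ("pescatarian", "pescetarian"):
--         return any(x in hay for x in ("pescatarian", "pescetarian", "seafood", "fish"))
--     # Generic: phrase appears in combined text
--     return rl in hay
-- ===== SOURCE B (Python) =====
-- # B inverts the data flow: instead of dispatching on the rule and then probing hay,
-- # it first derives from hay the list of ALL dietary aliases the text satisfies,
-- # then answers with a single membership test (unknown rules fall back to substring search).
--
-- _GROUPS = (
--     (("vegetarian", "veggie"), ("vegan", "vegetarian", "veg ")),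
--     (("vegan",), ("vegan",)),
--     (("halal",), ("halal",)),
--     (("kosher", "kosher-style", "kosher style"),
--      ("kosher", "glatt", "cholov", "pareve", "parve")),
--     (("gluten-free", "gluten free", "glutenfree", "celiac", "coeliac"),
--      ("gluten-free", "gluten free", "gluten friendly", "glutenfriendly",
--       "gf ", " celiac", "coeliac", "sans gluten")),
--     (("dairy-free", "dairy free", "lactose-free", "lactose free"),
--      ("dairy-free", "dairy free", "lactose-free", "lactose free", "non-dairy")),
--     (("nut-free", "nut free", "peanut-free", "tree nut"),
--      ("nut-free", "nut free", "peanut-free", "tree-nut")),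
--     (("egg-free", "egg free", "no egg", "without egg"),
--      ("egg-free", "egg free", "no egg", "eggless")),
--     (("pescatarian", "pescetarian"),
--      ("pescatarian", "pescetarian", "seafood", "fish")),
-- )
--
-- _KNOWN = frozenset(a for aliases, _ in _GROUPS for a in aliases)
--
--
-- def _dietary_satisfied(rule: str, hay: str) -> bool:
--     """Whether restaurant/menu text plausibly supports this dietary restriction."""
--     rl = rule.lower().strip()
--     if rl not in _KNOWN:
--         return rl in hay
--     satisfied = [a for aliases, subs in _GROUPS
--                  if any(x in hay for x in subs)
--                  for a in aliases]
--     return rl in satisfied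
-- ===== Notes on version B (the rewrite author's own statement) =====
-- stated objective: alternative
-- what changed: Inverts the data flow: instead of dispatching on the normalized rule and probing hay for that rule's synonyms (A's if/elif chain), B first computes from hay the list of ALL dietary aliases the text satisfies (one pass over a group table) and answers with a single membership test, falling back to substring search for unknown rules.
import Mathlib
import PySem

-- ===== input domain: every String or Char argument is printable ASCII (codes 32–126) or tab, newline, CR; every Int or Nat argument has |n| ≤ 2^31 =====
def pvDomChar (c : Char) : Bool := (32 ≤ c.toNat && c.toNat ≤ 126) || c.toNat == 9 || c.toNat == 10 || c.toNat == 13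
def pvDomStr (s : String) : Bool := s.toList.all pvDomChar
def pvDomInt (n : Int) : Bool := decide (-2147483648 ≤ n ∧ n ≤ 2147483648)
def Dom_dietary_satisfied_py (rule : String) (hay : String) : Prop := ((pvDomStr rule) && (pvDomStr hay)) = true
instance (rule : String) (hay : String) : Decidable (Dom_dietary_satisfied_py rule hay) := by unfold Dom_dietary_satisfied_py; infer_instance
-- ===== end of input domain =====

-- B inverts the data flow: it first computes from hay the list of all dietary aliases the text
-- satisfies, then answers with one membership test (unknown rules fall back to substring search).

-- ===== PORT A =====
def dietary_satisfied_py (rule : String) (hay : String) : Bool :=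
  let rl := PySem.Str.strip (PySem.Str.lower rule)
  if (["vegetarian", "veggie"]).contains rl then (["vegan", "vegetarian", "veg "]).any (fun x => PySem.Str.isIn x hay) else
  if rl == "vegan" then PySem.Str.isIn "vegan" hay else
  if rl == "halal" then PySem.Str.isIn "halal" hay else
  if (["kosher", "kosher-style", "kosher style"]).contains rl then (["kosher", "glatt", "cholov", "pareve", "parve"]).any (fun x => PySem.Str.isIn x hay) else
  if (["gluten-free", "gluten free", "glutenfree", "celiac", "coeliac"]).contains rl then (["gluten-free", "gluten free", "gluten friendly", "glutenfriendly", "gf ", " celiac", "coeliac", "sans gluten"]).any (fun x => PySem.Str.isIn x hay) else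
  if (["dairy-free", "dairy free", "lactose-free", "lactose free"]).contains rl then (["dairy-free", "dairy free", "lactose-free", "lactose free", "non-dairy"]).any (fun x => PySem.Str.isIn x hay) else
  if (["nut-free", "nut free", "peanut-free", "tree nut"]).contains rl then (["nut-free", "nut free", "peanut-free", "tree-nut"]).any (fun x => PySem.Str.isIn x hay) else
  if (["egg-free", "egg free", "no egg", "without egg"]).contains rl then (["egg-free", "egg free", "no egg", "eggless"]).any (fun x => PySem.Str.isIn x hay) else
  if (["pescatarian", "pescetarian"]).contains rl then (["pescatarian", "pescetarian", "seafood", "fish"]).any (fun x => PySem.Str.isIn x hay) else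
  PySem.Str.isIn rl hay

-- ===== PORT B =====
-- module-level _GROUPS table from Source B
def pvGroups : List (List String × List String) :=
  [ (["vegetarian", "veggie"], ["vegan", "vegetarian", "veg "]),
    (["vegan"], ["vegan"]),
    (["halal"], ["halal"]),
    (["kosher", "kosher-style", "kosher style"], ["kosher", "glatt", "cholov", "pareve", "parve"]),
    (["gluten-free", "gluten free", "glutenfree", "celiac", "coeliac"],
     ["gluten-free", "gluten free", "gluten friendly", "glutenfriendly", "gf ", " celiac", "coeliac", "sans gluten"]),
    (["dairy-free", "dairy free", "lactose-free", "lactose free"],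
     ["dairy-free", "dairy free", "lactose-free", "lactose free", "non-dairy"]),
    (["nut-free", "nut free", "peanut-free", "tree nut"], ["nut-free", "nut free", "peanut-free", "tree-nut"]),
    (["egg-free", "egg free", "no egg", "without egg"], ["egg-free", "egg free", "no egg", "eggless"]),
    (["pescatarian", "pescetarian"], ["pescatarian", "pescetarian", "seafood", "fish"]) ]

-- module-level _KNOWN = frozenset(a for aliases, _ in _GROUPS for a in aliases)
def pvKnown : PySem.Set String := PySem.Set.ofList (pvGroups.flatMap Prod.fst)

def dietary_satisfied_py_alt (rule : String) (hay : String) : Bool :=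
  let rl := PySem.Str.strip (PySem.Str.lower rule)
  if !(PySem.Set.contains pvKnown rl) then PySem.Str.isIn rl hay
  else
    -- satisfied = [a for aliases, subs in _GROUPS if any(x in hay for x in subs) for a in aliases]
    let satisfied := (pvGroups.filter (fun g => g.2.any (fun x => PySem.Str.isIn x hay))).flatMap Prod.fst
    satisfied.contains rl

-- ===== PRECONDITION & SPEC =====
def Spec_dietary_satisfied_py (rule : String) (hay : String) (out : Bool) : Prop := out = dietary_satisfied_py_alt rule hay
instance (rule : String) (hay : String) (out : Bool) : Decidable (Spec_dietary_satisfied_py rule hay out) := by unfold Spec_dietary_satisfied_py; infer_instance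

-- ===== CLAIM (what is proved, stated in full; the proofs are below) =====
def Claim_equal_dietary_satisfied_py : Prop := ∀ (rule : String) (hay : String), Dom_dietary_satisfied_py rule hay → Spec_dietary_satisfied_py rule hay (dietary_satisfied_py rule hay)

-- ===== LEMMAS AND PROOFS =====
-- membership in the flattened filtered groups = some group passes the filter and lists x
theorem contains_flatMap_filter {α β : Type} [BEq β] (p : α → Bool) (f : α → List β) (x : β)
    (l : List α) :
    ((l.filter p).flatMap f).contains x = l.any (fun a => p a && (f a).contains x) := by
  induction l with
  | nil => rfl
  | cons a t ih =>
    cases hp : p a <;>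
      simp [hp, List.any_cons, ih, List.contains_append]

theorem pvKnown_eval : pvKnown =
    ["vegetarian", "veggie", "vegan", "halal", "kosher", "kosher-style", "kosher style",
     "gluten-free", "gluten free", "glutenfree", "celiac", "coeliac",
     "dairy-free", "dairy free", "lactose-free", "lactose free",
     "nut-free", "nut free", "peanut-free", "tree nut",
     "egg-free", "egg free", "no egg", "without egg",
     "pescatarian", "pescetarian"] := by decide

-- ===== VERDICT (by name: the statement is the Claim_ definition above) =====
set_option maxRecDepth 8000 in
theorem dietary_satisfied_py_spec : Claim_equal_dietary_satisfied_py := by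
  intro rule hay _
  unfold Spec_dietary_satisfied_py dietary_satisfied_py dietary_satisfied_py_alt
  generalize PySem.Str.strip (PySem.Str.lower rule) = rl
  simp only [pvKnown_eval, contains_flatMap_filter]
  by_cases h0 : rl = "vegetarian"
  · subst h0; simp [pvGroups]
  by_cases h1 : rl = "veggie"
  · subst h1; simp [pvGroups]
  by_cases h2 : rl = "vegan"
  · subst h2; simp [pvGroups]
  by_cases h3 : rl = "halal"
  · subst h3; simp [pvGroups]
  by_cases h4 : rl = "kosher"
  · subst h4; simp [pvGroups]
  by_cases h5 : rl = "kosher-style"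
  · subst h5; simp [pvGroups]
  by_cases h6 : rl = "kosher style"
  · subst h6; simp [pvGroups]
  by_cases h7 : rl = "gluten-free"
  · subst h7; simp [pvGroups]
  by_cases h8 : rl = "gluten free"
  · subst h8; simp [pvGroups]
  by_cases h9 : rl = "glutenfree"
  · subst h9; simp [pvGroups]
  by_cases h10 : rl = "celiac"
  · subst h10; simp [pvGroups]
  by_cases h11 : rl = "coeliac"
  · subst h11; simp [pvGroups]
  by_cases h12 : rl = "dairy-free"
  · subst h12; simp [pvGroups]
  by_cases h13 : rl = "dairy free"
  · subst h13; simp [pvGroups]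
  by_cases h14 : rl = "lactose-free"
  · subst h14; simp [pvGroups]
  by_cases h15 : rl = "lactose free"
  · subst h15; simp [pvGroups]
  by_cases h16 : rl = "nut-free"
  · subst h16; simp [pvGroups]
  by_cases h17 : rl = "nut free"
  · subst h17; simp [pvGroups]
  by_cases h18 : rl = "peanut-free"
  · subst h18; simp [pvGroups]
  by_cases h19 : rl = "tree nut"
  · subst h19; simp [pvGroups]
  by_cases h20 : rl = "egg-free"
  · subst h20; simp [pvGroups]
  by_cases h21 : rl = "egg free"
  · subst h21; simp [pvGroups]
  by_cases h22 : rl = "no egg"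
  · subst h22; simp [pvGroups]
  by_cases h23 : rl = "without egg"
  · subst h23; simp [pvGroups]
  by_cases h24 : rl = "pescatarian"
  · subst h24; simp [pvGroups]
  by_cases h25 : rl = "pescetarian"
  · subst h25; simp [pvGroups]
  simp [h0, h1, h2, h3, h4, h5, h6, h7, h8, h9, h10, h11, h12, h13, h14, h15,
        h16, h17, h18, h19, h20, h21, h22, h23, h24, h25]
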